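-- pv_equiv track=rewrite | github.com/theodorselimovic/Text-as-data-master-thesis-repo | scripts/03_bow_analysis/term_document_matrix.py | aggregate_to_categories
-- ===== SOURCE A (Python) =====
-- def aggregate_to_categories(
--     term_counts: dict, risk_dictionary: dict
-- ) -> dict:
--     """
--     Aggregate term-level counts to category-level.
--
--     Parameters
--     ----------
--     term_counts : dict
--         {term: count} from count_terms_per_document().
--     risk_dictionary : dict
--         The RISK_DICTIONARY.
--
--     Returns
--     -------
--     dict
--         {category: sum_of_term_counts}.
--     """
--     category_counts = {}
--     for category, terms in risk_dictionary.items():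
--         category_counts[category] = sum(
--             term_counts.get(term, 0) for term in terms
--         )
--     return category_counts
-- ===== SOURCE B (Python) =====
-- def aggregate_to_categories(
--     term_counts: dict, risk_dictionary: dict
-- ) -> dict:
--     """Aggregate term-level counts to category-level via an inverted index."""
--     index = {}
--     category_counts = {}
--     for category, terms in risk_dictionary.items():
--         category_counts[category] = 0
--         for term in terms:
--             index.setdefault(term, []).append(category)
--     for term, count in term_counts.items():
--         for category in index.get(term, ()):
--             category_counts[category] += count
--     return category_counts
-- ===== Notes on version B (the rewrite author's own statement) =====
-- stated objective: alternative
-- what changed: Instead of scanning every category's term list and looking each term up in term_counts, B builds an inverted index term->categories (with multiplicity) plus zero-initialized category counts in one pass over risk_dictionary, then makes a single pass over term_counts fanning each observed count out to the term's categories.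
import Mathlib
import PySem

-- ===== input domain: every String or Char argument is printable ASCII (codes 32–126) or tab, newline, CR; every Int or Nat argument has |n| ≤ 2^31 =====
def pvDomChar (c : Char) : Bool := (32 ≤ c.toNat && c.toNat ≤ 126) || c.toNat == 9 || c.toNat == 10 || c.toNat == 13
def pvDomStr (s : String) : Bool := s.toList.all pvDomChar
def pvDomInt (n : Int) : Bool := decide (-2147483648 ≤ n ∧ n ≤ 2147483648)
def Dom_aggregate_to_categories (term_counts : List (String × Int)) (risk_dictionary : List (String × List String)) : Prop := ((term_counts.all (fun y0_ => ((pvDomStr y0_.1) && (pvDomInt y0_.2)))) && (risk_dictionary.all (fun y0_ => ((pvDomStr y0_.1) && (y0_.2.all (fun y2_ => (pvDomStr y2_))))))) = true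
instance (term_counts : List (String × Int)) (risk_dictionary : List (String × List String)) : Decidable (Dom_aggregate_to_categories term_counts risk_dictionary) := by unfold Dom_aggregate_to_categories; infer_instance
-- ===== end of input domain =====

-- B replaces A's per-category scan of term lists with an inverted index term→categories
-- (built, with multiplicity, together with zero-initialized counts in one pass over
-- risk_dictionary), then a single pass over term_counts fans each count out to that
-- term's categories; same result, different traversal ('alternative').

-- ===== PORT A =====
-- dict parameters enter as insertion-order association lists; PySem.Dict.ofList is the dict they denote
def aggregate_to_categories (term_counts : List (String × Int)) (risk_dictionary : List (String × List String)) : List (String × Int) :=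
  let tcd := PySem.Dict.ofList term_counts
  let rdd := PySem.Dict.ofList risk_dictionary
  -- for category, terms in risk_dictionary.items(): category_counts[category] = sum(term_counts.get(term, 0) for term in terms)
  (rdd.items.foldl
    (fun (cc : PySem.Dict String Int) p =>
      cc.insert p.1 (p.2.foldl (fun s t => s + tcd.getD t 0) 0))
    PySem.Dict.empty).items

-- ===== PORT B =====
def aggregate_to_categories_alt (term_counts : List (String × Int)) (risk_dictionary : List (String × List String)) : List (String × Int) :=
  let tcd := PySem.Dict.ofList term_counts
  let rdd := PySem.Dict.ofList risk_dictionary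
  -- one pass over risk_dictionary: index.setdefault(term, []).append(category); category_counts[category] = 0
  let st := rdd.items.foldl
    (fun (st : PySem.Dict String (List String) × PySem.Dict String Int) p =>
      (p.2.foldl (fun ix t => ix.modify t [] (fun l => l ++ [p.1])) st.1,
       st.2.insert p.1 0))
    (PySem.Dict.empty, PySem.Dict.empty)
  -- one pass over term_counts: for category in index.get(term, ()): category_counts[category] += count
  (tcd.items.foldl
    (fun cc q => (st.1.getD q.1 []).foldl (fun cc c => cc.modify c 0 (fun v => v + q.2)) cc)
    st.2).items

-- ===== PRECONDITION & SPEC =====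
def Spec_aggregate_to_categories (term_counts : List (String × Int)) (risk_dictionary : List (String × List String)) (out : List (String × Int)) : Prop := out = aggregate_to_categories_alt term_counts risk_dictionary
instance (term_counts : List (String × Int)) (risk_dictionary : List (String × List String)) (out : List (String × Int)) : Decidable (Spec_aggregate_to_categories term_counts risk_dictionary out) := by unfold Spec_aggregate_to_categories; infer_instance

-- ===== CLAIM (what is proved, stated in full; the proofs are below) =====
def Claim_equal_aggregate_to_categories : Prop := ∀ (term_counts : List (String × Int)) (risk_dictionary : List (String × List String)), Dom_aggregate_to_categories term_counts risk_dictionary → Spec_aggregate_to_categories term_counts risk_dictionary (aggregate_to_categories term_counts risk_dictionary)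

-- ===== LEMMAS AND PROOFS =====

-- proof-only abbreviations for the three intermediate structures of B
def pvIx (risk_dictionary : List (String × List String)) : PySem.Dict String (List String) :=
  (PySem.Dict.ofList risk_dictionary).items.foldl
    (fun ix p => p.2.foldl (fun ix t => ix.modify t [] (fun l => l ++ [p.1])) ix) PySem.Dict.empty

def pvCc0 (risk_dictionary : List (String × List String)) : PySem.Dict String Int :=
  (PySem.Dict.ofList risk_dictionary).items.foldl (fun cc p => cc.insert p.1 0) PySem.Dict.empty

def pvL (risk_dictionary : List (String × List String)) : List (String × String) :=
  (PySem.Dict.ofList risk_dictionary).items.flatMap (fun p => p.2.map (fun t => (t, p.1)))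

def pvFin (term_counts : List (String × Int)) (risk_dictionary : List (String × List String)) : PySem.Dict String Int :=
  (PySem.Dict.ofList term_counts).items.foldl
    (fun cc q => ((pvIx risk_dictionary).getD q.1 []).foldl (fun cc c => cc.modify c 0 (fun v => v + q.2)) cc)
    (pvCc0 risk_dictionary)

lemma pv_alt_eq_fin (term_counts : List (String × Int)) (risk_dictionary : List (String × List String)) :
    aggregate_to_categories_alt term_counts risk_dictionary = (pvFin term_counts risk_dictionary).items := by
  simp only [aggregate_to_categories_alt]
  rw [PySem.List.foldl_prod_mk
      (fun (ix : PySem.Dict String (List String)) (p : String × List String) =>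
        p.2.foldl (fun ix t => ix.modify t [] (fun l => l ++ [p.1])) ix)
      (fun (cc : PySem.Dict String Int) (p : String × List String) => cc.insert p.1 0)]
  rfl

-- an outer fold whose body folds an inner list is the fold of the flattened list
lemma pv_foldl_foldl_flatMap {α β σ : Type} (l : List α) (g : α → List β) (f : σ → β → σ) (s : σ) :
    l.foldl (fun s x => (g x).foldl f s) s = (l.flatMap g).foldl f s := by
  induction l generalizing s with
  | nil => rfl
  | cons a l ih => simp only [List.foldl_cons, List.flatMap_cons, List.foldl_append, ih]

lemma pv_sum_flatMap {α β : Type} (l : List α) (g : α → List β) (f : β → Int) :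
    ((l.flatMap g).map f).sum = (l.map (fun x => ((g x).map f).sum)).sum := by
  induction l with
  | nil => rfl
  | cons a l ih => simp [List.flatMap_cons, ih]

-- under distinct first components, a sum of 'if q.1 = p.1' picks out exactly p's contribution
lemma pv_sum_ite_fst {β M : Type} [AddCommMonoid M] (l : List (String × β)) (f : String × β → M)
    (p : String × β) (hnd : (l.map Prod.fst).Nodup) (hp : p ∈ l) :
    (l.map (fun q => if q.1 = p.1 then f q else 0)).sum = f p := by
  induction l with
  | nil => cases hp
  | cons a l ih =>
    simp only [List.map_cons, List.nodup_cons, List.mem_map] at hnd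
    rcases List.mem_cons.mp hp with h | h
    · subst h
      have hz : ((l.map (fun q => if q.1 = p.1 then f q else 0))).sum = 0 := by
        apply List.sum_eq_zero
        intro x hx
        rcases List.mem_map.mp hx with ⟨q, hq, rfl⟩
        have : q.1 ≠ p.1 := fun he => hnd.1 ⟨q, hq, he⟩
        simp [this]
      simp [hz]
    · have hne : a.1 ≠ p.1 := fun he => hnd.1 ⟨p, h, he.symm⟩
      simp [hne, ih hnd.2 h]

-- first-match lookup in a dict with distinct keys equals the sum of the matching values
lemma pv_getD_eq_sum (l : List (String × Int)) (hnd : (l.map Prod.fst).Nodup) (t : String) :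
    (PySem.Dict.mk l).getD t 0 = (l.map (fun q => if q.1 = t then q.2 else 0)).sum := by
  induction l with
  | nil => rfl
  | cons a l ih =>
    simp only [List.map_cons, List.nodup_cons, List.mem_map] at hnd
    rw [PySem.Dict.getD_eq_get?_getD, PySem.Dict.get?_mk_cons]
    by_cases h : a.1 = t
    · have hz : ((l.map (fun q => if q.1 = t then q.2 else 0))).sum = 0 := by
        apply List.sum_eq_zero
        intro x hx
        rcases List.mem_map.mp hx with ⟨q, hq, rfl⟩
        have : q.1 ≠ t := fun he => hnd.1 ⟨q, hq, by rw [he, h]⟩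
        simp [this]
      simp [h, hz]
    · simp only [beq_iff_eq, h, if_false]
      rw [← PySem.Dict.getD_eq_get?_getD, ih hnd.2]
      simp [h]

lemma pv_nodup_keys (risk_dictionary : List (String × List String)) :
    ((PySem.Dict.ofList risk_dictionary).items.map Prod.fst).Nodup := by
  have h := PySem.Dict.nodup_keys_ofList (κ := String) (ν := List String) risk_dictionary
  simpa [PySem.Dict.keys] using h

-- the inverted index flattened
lemma pv_ix_eq (risk_dictionary : List (String × List String)) :
    pvIx risk_dictionary
      = (pvL risk_dictionary).foldl (fun d q => d.modify q.1 [] (fun l => l ++ [q.2])) PySem.Dict.empty := by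
  rw [pvIx, pvL, ← pv_foldl_foldl_flatMap]
  congr 1
  funext ix p
  rw [List.foldl_map]

lemma pv_getD_ix (risk_dictionary : List (String × List String)) (t : String) :
    (pvIx risk_dictionary).getD t []
      = ((pvL risk_dictionary).filter (fun r => r.1 == t)).map Prod.snd := by
  rw [pv_ix_eq, PySem.Dict.getD_foldl_modify_append, PySem.Dict.getD_empty]
  rfl

lemma pv_mem_ix (risk_dictionary : List (String × List String)) (t c : String)
    (h : c ∈ (pvIx risk_dictionary).getD t []) :
    c ∈ (PySem.Dict.ofList risk_dictionary).items.map Prod.fst := by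
  rw [pv_getD_ix] at h
  rcases List.mem_map.mp h with ⟨r, hr, rfl⟩
  rcases List.mem_flatMap.mp (List.mem_of_mem_filter hr) with ⟨p, hp, hrp⟩
  rcases List.mem_map.mp hrp with ⟨_, _, rfl⟩
  exact List.mem_map.mpr ⟨p, hp, rfl⟩

-- multiplicity of category p.1 in the index entry of term t = multiplicity of t in p's term list
lemma pv_count_ix (risk_dictionary : List (String × List String)) (p : String × List String)
    (hp : p ∈ (PySem.Dict.ofList risk_dictionary).items) (t : String) :
    ((pvIx risk_dictionary).getD t []).count p.1 = p.2.count t := by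
  rw [pv_getD_ix, List.count_eq_countP, List.countP_map, List.countP_filter, pvL, List.countP_flatMap]
  have hstep : ∀ p' : String × List String,
      (List.map (fun t' => (t', p'.1)) p'.2).countP
          (fun a => (Prod.snd a == p.1) && (a.1 == t))
        = if p'.1 = p.1 then p'.2.count t else 0 := by
    intro p'
    rw [List.countP_map]
    by_cases h : p'.1 = p.1
    · simp [h, Function.comp_def, List.count_eq_countP]
    · simp [h, Function.comp_def]
  calc ((PySem.Dict.ofList risk_dictionary).items.map
          (fun p' => (List.map (fun t' => (t', p'.1)) p'.2).countP
            (fun a => (Prod.snd a == p.1) && (a.1 == t)))).sum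
      = ((PySem.Dict.ofList risk_dictionary).items.map
          (fun p' => if p'.1 = p.1 then p'.2.count t else 0)).sum := by
        exact congrArg List.sum (List.map_congr_left (fun p' _ => hstep p'))
    _ = p.2.count t := pv_sum_ite_fst _ _ p (pv_nodup_keys risk_dictionary) hp

-- phase-1 counts: all categories, in order, at 0
lemma pv_items_cc0 (risk_dictionary : List (String × List String)) :
    (pvCc0 risk_dictionary).items
      = (PySem.Dict.ofList risk_dictionary).items.map (fun p => (p.1, (0 : Int))) := by
  rw [pvCc0, PySem.Dict.items_foldl_insert_fresh _ Prod.fst (fun _ => (0 : Int)) PySem.Dict.empty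
      (fun a _ => PySem.Dict.contains_empty a.1) (pv_nodup_keys risk_dictionary)]
  rfl

lemma pv_keys_cc0 (risk_dictionary : List (String × List String)) :
    (pvCc0 risk_dictionary).keys = (PySem.Dict.ofList risk_dictionary).items.map Prod.fst := by
  show (pvCc0 risk_dictionary).items.map Prod.fst = _
  rw [pv_items_cc0, List.map_map]
  rfl

-- a fold of 'counts[c] += n' steps: effect on one key
lemma pv_getD_addfold (u : List (String × Int)) (cc : PySem.Dict String Int) (k : String) :
    (u.foldl (fun cc r => cc.modify r.1 0 (fun v => v + r.2)) cc).getD k 0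
      = cc.getD k 0 + ((u.filter (fun r => r.1 == k)).map Prod.snd).sum := by
  induction u generalizing cc with
  | nil => simp
  | cons r u ih =>
    rw [List.foldl_cons, ih, PySem.Dict.getD_modify]
    by_cases h : k = r.1
    · simp [h.symm]
      ring
    · have h' : ¬ (r.1 = k) := fun he => h he.symm
      simp [h, h']

-- a fold of 'counts[c] += n' steps over already-present keys keeps the key list
lemma pv_keys_addfold (u : List (String × Int)) (cc : PySem.Dict String Int)
    (h : ∀ r ∈ u, r.1 ∈ cc.keys) :
    (u.foldl (fun cc r => cc.modify r.1 0 (fun v => v + r.2)) cc).keys = cc.keys := by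
  induction u generalizing cc with
  | nil => rfl
  | cons r u ih =>
    have hk : (cc.modify r.1 0 (fun v => v + r.2)).keys = cc.keys := by
      rw [PySem.Dict.keys_modify]
      exact PySem.Dict.keys_insert_of_contains cc _
        ((PySem.Dict.contains_iff_mem_keys cc r.1).mpr (h r (List.mem_cons_self)))
    rw [List.foldl_cons, ih _ (fun r' hr' => by rw [hk]; exact h r' (List.mem_cons_of_mem _ hr')), hk]

def pvU (term_counts : List (String × Int)) (risk_dictionary : List (String × List String)) : List (String × Int) :=
  (PySem.Dict.ofList term_counts).items.flatMap
    (fun q => ((pvIx risk_dictionary).getD q.1 []).map (fun c => (c, q.2)))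

lemma pv_fin_eq (term_counts : List (String × Int)) (risk_dictionary : List (String × List String)) :
    pvFin term_counts risk_dictionary
      = (pvU term_counts risk_dictionary).foldl
          (fun cc r => cc.modify r.1 0 (fun v => v + r.2)) (pvCc0 risk_dictionary) := by
  rw [pvFin, pvU, ← pv_foldl_foldl_flatMap]
  congr 1
  funext cc q
  rw [List.foldl_map]

lemma pv_mem_U (term_counts : List (String × Int)) (risk_dictionary : List (String × List String))
    (r : String × Int) (hr : r ∈ pvU term_counts risk_dictionary) :
    r.1 ∈ (pvCc0 risk_dictionary).keys := by
  rw [pv_keys_cc0]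
  rcases List.mem_flatMap.mp hr with ⟨q, _, hrq⟩
  rcases List.mem_map.mp hrq with ⟨c, hc, rfl⟩
  exact pv_mem_ix risk_dictionary q.1 c hc

lemma pv_keys_fin (term_counts : List (String × Int)) (risk_dictionary : List (String × List String)) :
    (pvFin term_counts risk_dictionary).keys = (pvCc0 risk_dictionary).keys := by
  rw [pv_fin_eq]
  exact pv_keys_addfold _ _ (pv_mem_U term_counts risk_dictionary)

-- the value B ends with at key p.1
lemma pv_getD_fin (term_counts : List (String × Int)) (risk_dictionary : List (String × List String))
    (p : String × List String) (hp : p ∈ (PySem.Dict.ofList risk_dictionary).items) :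
    (pvFin term_counts risk_dictionary).getD p.1 0
      = ((PySem.Dict.ofList term_counts).items.map
          (fun q => (p.2.count q.1 : Int) * q.2)).sum := by
  rw [pv_fin_eq, pv_getD_addfold]
  have h0 : (pvCc0 risk_dictionary).getD p.1 0 = 0 := by
    have hmem : (p.1, (0 : Int)) ∈ (pvCc0 risk_dictionary).items := by
      rw [pv_items_cc0]; exact List.mem_map.mpr ⟨p, hp, rfl⟩
    have hnd : (pvCc0 risk_dictionary).keys.Nodup := by
      rw [pv_keys_cc0]; exact pv_nodup_keys risk_dictionary
    exact PySem.Dict.getD_of_mem_items _ hmem hnd 0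
  rw [h0, zero_add, pvU, List.filter_flatMap]
  have hq : ∀ q : String × Int,
      ((List.filter (fun r => r.1 == p.1)
          (((pvIx risk_dictionary).getD q.1 []).map (fun c => (c, q.2)))).map Prod.snd).sum
        = (p.2.count q.1 : Int) * q.2 := by
    intro q
    simp only [List.filter_map, List.map_map, Function.comp_def]
    have hlen : (((pvIx risk_dictionary).getD q.1 []).filter (fun c => c == p.1)).length
        = ((pvIx risk_dictionary).getD q.1 []).count p.1 := by
      rw [List.count_eq_countP, List.countP_eq_length_filter]
    rw [PySem.List.sum_map_const_int, hlen, pv_count_ix risk_dictionary p hp q.1]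
  rw [pv_sum_flatMap]
  exact congrArg List.sum (List.map_congr_left (fun q _ => hq q))

-- the value A computes for the term list ts, rewritten as a sum over term_counts' entries
lemma pv_sum_getD_eq (term_counts : List (String × Int)) (ts : List String) :
    (ts.map (fun t => (PySem.Dict.ofList term_counts).getD t 0)).sum
      = ((PySem.Dict.ofList term_counts).items.map (fun q => (ts.count q.1 : Int) * q.2)).sum := by
  induction ts with
  | nil =>
    simp only [List.map_nil, List.sum_nil]
    symm
    apply List.sum_eq_zero
    intro x hx
    rcases List.mem_map.mp hx with ⟨q, _, rfl⟩
    simp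
  | cons t ts ih =>
    have hnd : ((PySem.Dict.ofList term_counts).items.map Prod.fst).Nodup := by
      have h := PySem.Dict.nodup_keys_ofList (κ := String) (ν := Int) term_counts
      simpa [PySem.Dict.keys] using h
    have hmk : PySem.Dict.mk (PySem.Dict.ofList term_counts).items = PySem.Dict.ofList term_counts :=
      PySem.Dict.ext rfl
    have hstep : ∀ q : String × Int, ((t :: ts).count q.1 : Int) * q.2
        = (if q.1 = t then q.2 else 0) + (ts.count q.1 : Int) * q.2 := by
      intro q
      by_cases h : q.1 = t
      · simp [h]
        ring
      · have : ¬ (t = q.1) := fun he => h he.symm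
        simp [this, h]
    rw [List.map_cons, List.sum_cons, ih,
        List.map_congr_left (fun q (_ : q ∈ (PySem.Dict.ofList term_counts).items) => hstep q),
        PySem.List.sum_map_add_int]
    have hl : (PySem.Dict.ofList term_counts).getD t 0
        = ((PySem.Dict.ofList term_counts).items.map (fun q => if q.1 = t then q.2 else 0)).sum := by
      conv_lhs => rw [← hmk]
      exact pv_getD_eq_sum _ hnd t
    rw [hl]

-- ===== VERDICT (by name: the statement is the Claim_ definition above) =====
theorem aggregate_to_categories_spec : Claim_equal_aggregate_to_categories := by
  intro term_counts risk_dictionary _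
  unfold Spec_aggregate_to_categories
  rw [pv_alt_eq_fin]
  show (((PySem.Dict.ofList risk_dictionary).items.foldl
      (fun (cc : PySem.Dict String Int) p =>
        cc.insert p.1 (p.2.foldl (fun s t => s + (PySem.Dict.ofList term_counts).getD t 0) 0))
      PySem.Dict.empty).items) = (pvFin term_counts risk_dictionary).items
  rw [PySem.Dict.items_foldl_insert_fresh _ Prod.fst
      (fun p => p.2.foldl (fun s t => s + (PySem.Dict.ofList term_counts).getD t 0) 0)
      PySem.Dict.empty (fun a _ => PySem.Dict.contains_empty a.1) (pv_nodup_keys risk_dictionary)]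
  have hndfin : (pvFin term_counts risk_dictionary).keys.Nodup := by
    rw [pv_keys_fin, pv_keys_cc0]; exact pv_nodup_keys risk_dictionary
  rw [PySem.Dict.items_eq_map_keys _ hndfin 0, pv_keys_fin, pv_keys_cc0, List.map_map]
  show _ = (PySem.Dict.ofList risk_dictionary).items.map
      (fun p => (p.1, (pvFin term_counts risk_dictionary).getD p.1 0))
  rw [show (PySem.Dict.empty : PySem.Dict String Int).items = [] from rfl, List.nil_append]
  apply List.map_congr_left
  intro p hp
  rw [pv_getD_fin term_counts risk_dictionary p hp,
      PySem.List.foldl_add, zero_add, pv_sum_getD_eq]
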